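-- pv_equiv track=rewrite | github.com/lfuret/CantoneseLearner | word_analyzer.py | get_words_by_length
-- ===== SOURCE A (Python) =====
-- from collections import Counter
-- from typing import Dict, Any, List
--
-- def get_words_by_length(word_frequency: Counter) -> Dict[int, List[tuple]]:
--     """
--     Group words by their character length.
--
--     Args:
--         word_frequency: Counter object with word frequencies
--
--     Returns:
--         Dictionary with length as key and list of (word, frequency) tuples as value
--     """
--     words_by_length = {}
--     for word, freq in word_frequency.items():
--         length = len(word)
--         if length not in words_by_length:
--             words_by_length[length] = []
--         words_by_length[length].append((word, freq))
--
--     # Sort words within each length group by frequency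
--     for length in words_by_length:
--         words_by_length[length].sort(key=lambda x: x[1], reverse=True)
--
--     return words_by_length
-- ===== SOURCE B (Python) =====
-- def get_words_by_length(word_frequency):
--     """Group words by length; within each group sort by frequency (desc).
--
--     One global stable sort instead of a per-group sort: bucket keys are
--     created in original iteration order, then a single pass over the
--     frequency-sorted items fills the buckets already in order.
--     """
--     items = list(word_frequency.items())
--     words_by_length = {len(word): [] for word, _ in items}
--     for word, freq in sorted(items, key=lambda x: x[1], reverse=True):
--         words_by_length[len(word)].append((word, freq))
--     return words_by_length
-- ===== Notes on version B (the rewrite author's own statement) =====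
-- stated objective: alternative
-- what changed: Instead of grouping first and then sorting each length-group separately, B performs one global stable sort of all items by frequency (descending) and fills the pre-created buckets in a single linear pass, relying on sort stability for identical tie order.
import Mathlib
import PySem

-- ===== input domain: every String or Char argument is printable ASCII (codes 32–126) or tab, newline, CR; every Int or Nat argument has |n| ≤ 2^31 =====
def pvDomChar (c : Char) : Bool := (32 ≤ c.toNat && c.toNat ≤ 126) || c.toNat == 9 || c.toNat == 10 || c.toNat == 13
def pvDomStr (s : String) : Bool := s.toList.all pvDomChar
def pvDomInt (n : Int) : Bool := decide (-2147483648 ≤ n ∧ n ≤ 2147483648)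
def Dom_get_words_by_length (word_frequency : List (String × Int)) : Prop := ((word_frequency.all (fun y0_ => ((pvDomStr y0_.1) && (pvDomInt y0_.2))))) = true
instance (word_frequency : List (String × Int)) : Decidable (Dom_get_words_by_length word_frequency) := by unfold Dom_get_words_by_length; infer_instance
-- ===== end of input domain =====

-- B replaces A's per-length-group sorts by ONE global stable sort of the items followed by a
-- single bucketing pass (alternative decomposition, same asymptotic cost).

-- ===== PORT A =====
-- A: group (word, freq) pairs by len(word), then sort each group by frequency descending.
def get_words_by_length (word_frequency : List (String × Int)) : List (Int × List (String × Int)) :=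
  -- the Counter/dict parameter, as Python iterates it
  let items := (PySem.Dict.ofList word_frequency).items
  -- for word, freq in word_frequency.items(): if length not in d: d[length] = []; d[length].append((word, freq))
  let d1 : PySem.Dict Int (List (String × Int)) :=
    items.foldl (fun d wf =>
      let length := PySem.Str.len wf.1
      let d := if d.contains length = false then d.insert length [] else d
      d.modify length [] (fun ws => ws ++ [wf])) PySem.Dict.empty
  -- for length in words_by_length: words_by_length[length].sort(key=lambda x: x[1], reverse=True)
  let d2 := d1.keys.foldl (fun d length =>
      d.modify length [] (fun ws => PySem.List.sorted ws (fun x => x.2) true)) d1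
  d2.items

-- ===== PORT B =====
-- B: bucket keys in original order, one global stable sort by frequency descending, one bucketing pass.
def get_words_by_length_alt (word_frequency : List (String × Int)) : List (Int × List (String × Int)) :=
  let items := (PySem.Dict.ofList word_frequency).items
  -- words_by_length = {len(word): [] for word, _ in items}
  let d0 : PySem.Dict Int (List (String × Int)) :=
    items.foldl (fun d wf => d.insert (PySem.Str.len wf.1) []) PySem.Dict.empty
  -- for word, freq in sorted(items, key=lambda x: x[1], reverse=True): d[len(word)].append((word, freq))
  let d1 := (PySem.List.sorted items (fun x => x.2) true).foldl
      (fun d wf => d.modify (PySem.Str.len wf.1) [] (fun ws => ws ++ [wf])) d0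
  d1.items

-- ===== PRECONDITION & SPEC =====
def Spec_get_words_by_length (word_frequency : List (String × Int)) (out : List (Int × List (String × Int))) : Prop := out = get_words_by_length_alt word_frequency
instance (word_frequency : List (String × Int)) (out : List (Int × List (String × Int))) : Decidable (Spec_get_words_by_length word_frequency out) := by unfold Spec_get_words_by_length; infer_instance

-- ===== CLAIM (what is proved, stated in full; the proofs are below) =====
def Claim_equal_get_words_by_length : Prop := ∀ (word_frequency : List (String × Int)), Dom_get_words_by_length word_frequency → Spec_get_words_by_length word_frequency (get_words_by_length word_frequency)

-- ===== LEMMAS AND PROOFS =====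

-- A's "if length not in d: d[length] = []" followed by the append collapses to a single modify.
theorem pv_setdefault_modify {κ ν : Type} [BEq κ] [LawfulBEq κ] (d : PySem.Dict κ ν) (k : κ) (f : ν → ν) (d0 : ν) :
    (if d.contains k = false then d.insert k d0 else d).modify k d0 f = d.modify k d0 f := by
  by_cases h : d.contains k = false
  · simp only [h, if_true, PySem.Dict.modify, PySem.Dict.getD_insert_self,
      PySem.Dict.insert_insert_self, PySem.Dict.getD_of_not_contains d d0 h]
  · simp [h]

-- insertBy puts x in front when it beats every element (used for the filtered tail).
theorem pv_insertBy_front {α : Type} (b : α → α → Bool) (x : α) (ys : List α)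
    (h : ∀ y, ys.head? = some y → b x y = true) :
    PySem.List.insertBy b x ys = x :: ys := by
  cases ys with
  | nil => rfl
  | cons y t => simp [PySem.List.insertBy, h y rfl]

-- insertBy preserves descending order.
theorem pv_pairwise_insertBy {α κ : Type} [LinearOrder κ] (key : α → κ) (x : α) (ys : List α)
    (h : ys.Pairwise (fun u v => key v ≤ key u)) :
    (PySem.List.insertBy (fun a b => decide (key b < key a)) x ys).Pairwise (fun u v => key v ≤ key u) := by
  induction ys with
  | nil => simp [PySem.List.insertBy]
  | cons y t ih =>
    rcases List.pairwise_cons.mp h with ⟨hy, ht⟩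
    by_cases hxy : key y < key x
    · simp only [PySem.List.insertBy, decide_eq_true_eq, if_pos hxy]
      refine List.pairwise_cons.mpr ⟨?_, h⟩
      intro v hv
      rcases List.mem_cons.mp hv with hv | hv
      · exact le_of_lt (hv ▸ hxy)
      · exact le_trans (hy v hv) (le_of_lt hxy)
    · simp only [PySem.List.insertBy, decide_eq_true_eq, if_neg hxy]
      refine List.pairwise_cons.mpr ⟨?_, ih ht⟩
      intro v hv
      rcases (PySem.List.mem_insertBy _ x v t).mp hv with hv | hv
      · exact hv ▸ le_of_not_gt hxy
      · exact hy v hv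

-- Filtering commutes with stable insertion into a descending list.
theorem pv_filter_insertBy {α κ : Type} [LinearOrder κ] (key : α → κ) (p : α → Bool) (x : α) (ys : List α)
    (h : ys.Pairwise (fun u v => key v ≤ key u)) :
    (PySem.List.insertBy (fun a b => decide (key b < key a)) x ys).filter p =
      if p x then PySem.List.insertBy (fun a b => decide (key b < key a)) x (ys.filter p)
      else ys.filter p := by
  induction ys with
  | nil => cases hx : p x <;> simp [PySem.List.insertBy, List.filter, hx]
  | cons y t ih =>
    rcases List.pairwise_cons.mp h with ⟨hy, ht⟩
    by_cases hxy : key y < key x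
    · rw [show PySem.List.insertBy (fun a b => decide (key b < key a)) x (y :: t) = x :: y :: t from by
        simp [PySem.List.insertBy, hxy]]
      cases hx : p x with
      | false =>
        rw [if_neg (by simp), List.filter_cons_of_neg (by simp [hx])]
      | true =>
        rw [if_pos rfl, List.filter_cons_of_pos hx]
        cases hpy : p y with
        | true =>
          rw [List.filter_cons_of_pos hpy]
          simp [PySem.List.insertBy, hxy]
        | false =>
          rw [List.filter_cons_of_neg (by simp [hpy])]
          rw [pv_insertBy_front]
          intro z hz
          have hzmem : z ∈ t.filter p := List.mem_of_mem_head? (by simpa using hz)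
          have hzy : key z ≤ key y := hy z (List.mem_of_mem_filter hzmem)
          simp only [decide_eq_true_eq]
          exact lt_of_le_of_lt hzy hxy
    · rw [show PySem.List.insertBy (fun a b => decide (key b < key a)) x (y :: t) =
        y :: PySem.List.insertBy (fun a b => decide (key b < key a)) x t from by
        simp [PySem.List.insertBy, hxy]]
      cases hpy : p y with
      | true =>
        rw [List.filter_cons_of_pos hpy, List.filter_cons_of_pos hpy, ih ht]
        cases hx : p x with
        | false => rw [if_neg (by simp), if_neg (by simp)]
        | true =>
          rw [if_pos rfl, if_pos rfl]
          rw [show PySem.List.insertBy (fun a b => decide (key b < key a)) x (y :: t.filter p) =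
            y :: PySem.List.insertBy (fun a b => decide (key b < key a)) x (t.filter p) from by
            simp [PySem.List.insertBy, hxy]]
      | false =>
        rw [List.filter_cons_of_neg (by simp [hpy]), List.filter_cons_of_neg (by simp [hpy]), ih ht]

-- Filtering commutes with the insertion-sort fold from a descending accumulator.
theorem pv_foldl_insertBy_filter {α κ : Type} [LinearOrder κ] (key : α → κ) (p : α → Bool) (xs : List α) :
    ∀ (acc : List α), acc.Pairwise (fun u v => key v ≤ key u) →
    (xs.foldl (fun acc x => PySem.List.insertBy (fun a b => decide (key b < key a)) x acc) acc).filter p =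
      (xs.filter p).foldl (fun acc x => PySem.List.insertBy (fun a b => decide (key b < key a)) x acc)
        (acc.filter p) := by
  induction xs with
  | nil => intro acc _; rfl
  | cons x xs ih =>
    intro acc hacc
    simp only [List.foldl_cons]
    rw [ih _ (pv_pairwise_insertBy key x acc hacc)]
    cases hx : p x with
    | true =>
      rw [List.filter_cons_of_pos (by simp [hx]), List.foldl_cons]
      congr 1
      rw [pv_filter_insertBy key p x acc hacc, hx, if_pos rfl]
    | false =>
      rw [List.filter_cons_of_neg (by simp [hx])]
      congr 1
      rw [pv_filter_insertBy key p x acc hacc, hx]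
      simp

-- STABILITY: filtering a descending stable sort = stable sort of the filtered list.
theorem pv_filter_sorted {α κ : Type} [LinearOrder κ] (key : α → κ) (p : α → Bool) (xs : List α) :
    (PySem.List.sorted xs key true).filter p = PySem.List.sorted (xs.filter p) key true := by
  rw [PySem.List.sorted_rev_eq_foldl_insertBy, PySem.List.sorted_rev_eq_foldl_insertBy,
    pv_foldl_insertBy_filter key p xs [] (by simp)]
  rfl

-- adding elements already present leaves a PySem.Set unchanged
theorem pv_set_update_of_mem {α : Type} [BEq α] [LawfulBEq α] (xs : List α) :
    ∀ (s : PySem.Set α), (∀ x ∈ xs, x ∈ s) → PySem.Set.update s xs = s := by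
  induction xs with
  | nil => intro s _; rfl
  | cons x xs ih =>
    intro s h
    have hx : s.contains x = true := by
      have := h x (by simp)
      simpa [List.contains_iff_mem] using this
    show PySem.Set.update (s.add x) xs = s
    rw [show s.add x = s from by simp [PySem.Set.add, h x (by simp)]]
    exact ih s (fun y hy => h y (by simp [hy]))

-- a fold of inserts with value [] keeps every stored value []
theorem pv_getD_foldl_insert_nil {α : Type} (keyf : α → Int) (xs : List α) :
    ∀ (d : PySem.Dict Int (List (String × Int))), (∀ k, d.getD k [] = []) →
    ∀ c, (xs.foldl (fun d x => d.insert (keyf x) ([] : List (String × Int))) d).getD c [] = [] := by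
  induction xs with
  | nil => intro d h c; exact h c
  | cons x xs ih =>
    intro d h c
    refine ih _ (fun k => ?_) c
    rw [PySem.Dict.getD_insert]
    split <;> simp [h]

-- a fold of modifies over a nodup key list touches each key once
theorem pv_getD_foldl_modify_nodup (g : List (String × Int) → List (String × Int)) (l : List Int) :
    ∀ (d : PySem.Dict Int (List (String × Int))), l.Nodup → ∀ c,
    (l.foldl (fun d k => d.modify k [] g) d).getD c [] = if c ∈ l then g (d.getD c []) else d.getD c [] := by
  induction l with
  | nil => intro d _ c; simp
  | cons k l ih =>
    intro d hnd c
    rcases List.nodup_cons.mp hnd with ⟨hk, hl⟩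
    simp only [List.foldl_cons]
    rw [ih _ hl c]
    by_cases hc : c = k
    · subst hc
      simp [hk]
    · rw [PySem.Dict.getD_modify]
      simp [hc]

-- one grouping-fold step reads as getD-append
theorem pv_getD_group (l : List (String × Int)) :
    ∀ (d : PySem.Dict Int (List (String × Int))) (c : Int),
    (l.foldl (fun d wf => d.modify (PySem.Str.len wf.1) [] (fun ws => ws ++ [wf])) d).getD c [] =
      d.getD c [] ++ l.filter (fun wf => PySem.Str.len wf.1 == c) := by
  induction l with
  | nil => intro d c; simp
  | cons wf l ih =>
    intro d c
    simp only [List.foldl_cons]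
    rw [ih]
    by_cases hc : c = PySem.Str.len wf.1
    · subst hc
      rw [List.filter_cons_of_pos (by simp)]
      rw [PySem.Dict.getD_modify]
      simp
    · have hc' : (wf.1.length : Int) ≠ c := by simpa [PySem.Str.len] using Ne.symm hc
      rw [List.filter_cons_of_neg (by simp [PySem.Str.len, hc']), PySem.Dict.getD_modify, if_neg hc]

-- the whole equivalence, for an arbitrary items list
theorem pv_main (its : List (String × Int)) :
    (((its.foldl (fun d wf =>
        let length := PySem.Str.len wf.1
        let d := if d.contains length = false then d.insert length [] else d
        d.modify length [] (fun ws => ws ++ [wf])) PySem.Dict.empty).keys.foldl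
          (fun d length => d.modify length [] (fun ws => PySem.List.sorted ws (fun x => x.2) true))
          (its.foldl (fun d wf =>
            let length := PySem.Str.len wf.1
            let d := if d.contains length = false then d.insert length [] else d
            d.modify length [] (fun ws => ws ++ [wf])) PySem.Dict.empty)).items)
    = (((PySem.List.sorted its (fun x => x.2) true).foldl
        (fun d wf => d.modify (PySem.Str.len wf.1) [] (fun ws => ws ++ [wf]))
        (its.foldl (fun d wf => d.insert (PySem.Str.len wf.1) []) PySem.Dict.empty)).items) := by
  -- A's first loop collapses to a plain modify-fold
  simp only [pv_setdefault_modify]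
  set S := PySem.List.sorted its (fun x : String × Int => x.2) true with hS
  set G := its.foldl (fun d wf => d.modify (PySem.Str.len wf.1) [] (fun ws => ws ++ [wf]))
      (PySem.Dict.empty : PySem.Dict Int (List (String × Int))) with hG
  set d0 := its.foldl (fun d wf => d.insert (PySem.Str.len wf.1) ([] : List (String × Int)))
      PySem.Dict.empty with hd0
  set d1 := S.foldl (fun d wf => d.modify (PySem.Str.len wf.1) [] (fun ws => ws ++ [wf])) d0 with hd1
  set d2 := G.keys.foldl
      (fun d length => d.modify length [] (fun ws => PySem.List.sorted ws (fun x : String × Int => x.2) true)) G with hd2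
  -- keys
  have hkG : G.keys = PySem.Set.update [] (its.map (fun wf => PySem.Str.len wf.1)) := by
    rw [hG, PySem.Dict.keys_foldl_modify_key its (fun wf => PySem.Str.len wf.1) []
      (fun _ wf => (fun ws => ws ++ [wf]))]
    simp
  have hndG : G.keys.Nodup := by
    rw [hG]
    exact PySem.Dict.nodup_keys_foldl_modify_key its (fun wf => PySem.Str.len wf.1) []
      (fun _ wf => (fun ws => ws ++ [wf])) _ (by simp)
  have hkd0 : d0.keys = PySem.Set.update [] (its.map (fun wf => PySem.Str.len wf.1)) := by
    rw [hd0, PySem.Dict.keys_foldl_insert_key its (fun wf => PySem.Str.len wf.1) (fun _ _ => [])]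
    simp
  have hndd0 : d0.keys.Nodup := by
    rw [hd0]
    exact PySem.Dict.nodup_keys_foldl_insert_key its (fun wf => PySem.Str.len wf.1)
      (fun _ _ => []) _ (by simp)
  have hkd2 : d2.keys = G.keys := by
    rw [hd2, PySem.Dict.keys_foldl_modify G.keys []
      (fun _ _ ws => PySem.List.sorted ws (fun x : String × Int => x.2) true) G]
    exact pv_set_update_of_mem _ _ (fun x hx => hx)
  have hkd1 : d1.keys = d0.keys := by
    rw [hd1, PySem.Dict.keys_foldl_modify_key S (fun wf => PySem.Str.len wf.1) []
      (fun _ wf => (fun ws => ws ++ [wf]))]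
    refine pv_set_update_of_mem _ _ (fun x hx => ?_)
    rw [hkd0]
    rcases List.mem_map.mp hx with ⟨wf, hwf, rfl⟩
    have : wf ∈ its := (PySem.List.mem_sorted its (fun x : String × Int => x.2) true wf).mp (hS ▸ hwf)
    have hm : PySem.Str.len wf.1 ∈ its.map (fun wf => PySem.Str.len wf.1) :=
      List.mem_map.mpr ⟨wf, this, rfl⟩
    exact (PySem.Set.mem_ofList _ _).mpr hm
  -- values
  have hvG : ∀ c, G.getD c [] = its.filter (fun wf => PySem.Str.len wf.1 == c) := by
    intro c
    rw [hG, pv_getD_group]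
    simp
  have hvd0 : ∀ c, d0.getD c [] = [] := by
    intro c
    rw [hd0]
    exact pv_getD_foldl_insert_nil _ its _ (fun k => by simp) c
  have hvd1 : ∀ c, d1.getD c [] = S.filter (fun wf => PySem.Str.len wf.1 == c) := by
    intro c
    rw [hd1, pv_getD_group, hvd0]
    simp
  have hvd2 : ∀ c, c ∈ G.keys →
      d2.getD c [] = PySem.List.sorted (its.filter (fun wf => PySem.Str.len wf.1 == c))
        (fun x : String × Int => x.2) true := by
    intro c hc
    rw [hd2, pv_getD_foldl_modify_nodup _ _ _ hndG c, if_pos hc, hvG]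
  -- assemble
  rw [PySem.Dict.items_eq_map_keys d2 (hkd2 ▸ hndG) [],
      PySem.Dict.items_eq_map_keys d1 (hkd1 ▸ hndd0) [],
      hkd2, hkd1, hkd0, ← hkG]
  refine List.map_congr_left (fun c hc => ?_)
  rw [hvd2 c hc, hvd1 c, hS, pv_filter_sorted]

-- ===== VERDICT (by name: the statement is the Claim_ definition above) =====
theorem get_words_by_length_spec : Claim_equal_get_words_by_length := by
  intro wf _
  show get_words_by_length wf = get_words_by_length_alt wf
  simp only [get_words_by_length, get_words_by_length_alt]
  exact pv_main _
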